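-- pv_equiv track=rewrite | github.com/AI-Empower-Cloud/AI-Video-Generator | educational_video_generator.py | break_into_syllables
-- ===== SOURCE A (Python) =====
-- def break_into_syllables(text):
--     """Break Sanskrit text into syllables for pronunciation guide."""
--     # Simple syllable breaking for demonstration
--     words = text.split()
--     syllable_guide = []
--
--     for word in words:
--         # Basic syllable separation (can be enhanced with proper Sanskrit rules)
--         syllables = []
--         current = ""
--         for char in word:
--             current += char
--             # Simple rule: after consonant+vowel combination
--             if len(current) >= 2:
--                 syllables.append(current)
--                 current = ""
--         if current:
--             syllables.append(current)
--         syllable_guide.append(" - ".join(syllables))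
--
--     return " | ".join(syllable_guide)
-- ===== SOURCE B (Python) =====
-- def break_into_syllables(text):
--     """Break Sanskrit text into syllables for pronunciation guide."""
--     return " | ".join(
--         " - ".join(word[i:i + 2] for i in range(0, len(word), 2))
--         for word in text.split()
--     )
-- ===== Notes on version B (the rewrite author's own statement) =====
-- stated objective: idiomatic
-- what changed: Replaces the per-character loop with its stateful buffer and len>=2 flush by a stride-2 slicing comprehension (word[i:i+2] for i in range(0, len(word), 2)), joined directly without intermediate accumulator lists.
import Mathlib
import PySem

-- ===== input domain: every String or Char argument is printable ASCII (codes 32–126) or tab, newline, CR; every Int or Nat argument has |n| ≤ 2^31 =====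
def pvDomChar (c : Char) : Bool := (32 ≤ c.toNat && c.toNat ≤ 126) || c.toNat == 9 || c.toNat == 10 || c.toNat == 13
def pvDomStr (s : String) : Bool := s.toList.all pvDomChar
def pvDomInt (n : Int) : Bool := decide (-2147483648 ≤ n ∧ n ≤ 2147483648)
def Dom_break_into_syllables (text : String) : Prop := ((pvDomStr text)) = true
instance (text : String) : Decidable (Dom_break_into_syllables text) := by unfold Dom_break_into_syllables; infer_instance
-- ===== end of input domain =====

-- B replaces A's per-character buffer/flush loop with a stride-2 slicing comprehension per word (idiomatic decomposition; same cost).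


-- ===== PORT A =====
-- A's inner loop body: current += char; flush when len(current) >= 2
def pvAStep (st : List (List Char) × List Char) (ch : Char) : List (List Char) × List Char :=
  let current := st.2 ++ [ch]
  if current.length ≥ 2 then (st.1 ++ [current], []) else (st.1, current)

-- A's per-word body: char loop, trailing-buffer flush, " - ".join
def pvAWord (word : String) : String :=
  let st := word.toList.foldl pvAStep ([], [])
  let syllables := if st.2 ≠ [] then st.1 ++ [st.2] else st.1
  String.ofList (PySem.Chars.join " - ".toList syllables)

def break_into_syllables (text : String) : String :=
  let words := PySem.Str.split₀ text
  let syllable_guide := words.foldl (fun guide word => guide ++ [pvAWord word]) []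
  PySem.Str.join " | " syllable_guide

-- ===== PORT B =====
-- B's per-word body: [word[i:i+2] for i in range(0, len(word), 2)], " - ".join
def pvBWord (word : String) : String :=
  String.ofList (PySem.Chars.join " - ".toList
    ((PySem.List.pyRange 0 (word.toList.length : Int) 2).map
      (fun i => PySem.List.slice word.toList (some i) (some (i + 2)))))

def break_into_syllables_alt (text : String) : String :=
  PySem.Str.join " | " ((PySem.Str.split₀ text).map pvBWord)

-- ===== PRECONDITION & SPEC =====
def Spec_break_into_syllables (text : String) (out : String) : Prop := out = break_into_syllables_alt text
instance (text : String) (out : String) : Decidable (Spec_break_into_syllables text out) := by unfold Spec_break_into_syllables; infer_instance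

-- ===== CLAIM (what is proved, stated in full; the proofs are below) =====
def Claim_equal_break_into_syllables : Prop := ∀ (text : String), Dom_break_into_syllables text → Spec_break_into_syllables text (break_into_syllables text)

-- ===== LEMMAS AND PROOFS =====

-- the common value of both per-word chunkings: pairs, with a possible odd singleton at the end
def pvChunk : List Char → List (List Char)
  | [] => []
  | [a] => [[a]]
  | a :: b :: t => [a, b] :: pvChunk t

-- A's foldl splits off an already-flushed prefix
theorem pvAStep_prefix (cs : List Char) : ∀ (p : List (List Char)) (cur : List Char),
    cs.foldl pvAStep (p, cur) =
      (p ++ (cs.foldl pvAStep ([], cur)).1, (cs.foldl pvAStep ([], cur)).2) := by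
  induction cs with
  | nil => intro p cur; simp
  | cons c cs ih =>
    intro p cur
    simp only [List.foldl_cons, pvAStep]
    by_cases h : (cur ++ [c]).length ≥ 2
    · simp only [if_pos h, List.nil_append]
      rw [ih (p ++ [cur ++ [c]]) [], ih [cur ++ [c]] []]
      simp
    · simp only [if_neg h]
      exact ih p (cur ++ [c])

theorem pvA_eq_chunk (cs : List Char) :
    (if (cs.foldl pvAStep ([], [])).2 ≠ [] then
        (cs.foldl pvAStep ([], [])).1 ++ [(cs.foldl pvAStep ([], [])).2]
      else (cs.foldl pvAStep ([], [])).1) = pvChunk cs := by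
  induction cs using pvChunk.induct with
  | case1 => simp [pvChunk]
  | case2 a => simp [pvAStep, pvChunk]
  | case3 a b t ih =>
    have e : (a :: b :: t).foldl pvAStep ([], []) =
        ([[a, b]] ++ (t.foldl pvAStep ([], [])).1, (t.foldl pvAStep ([], [])).2) := by
      show (t.foldl pvAStep (pvAStep (pvAStep ([], []) a) b)) = _
      have e1 : pvAStep (pvAStep ([], []) a) b = ([[a, b]], []) := by
        simp [pvAStep]
      rw [e1]
      exact pvAStep_prefix t [[a, b]] []
    rw [e]
    simp only [pvChunk]
    by_cases h : (t.foldl pvAStep ([], [])).2 = []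
    · simp only [h, ne_eq, not_true_eq_false, if_false] at ih ⊢
      rw [ih]; rfl
    · simp only [h, ne_eq, not_false_eq_true, if_true] at ih ⊢
      rw [List.append_assoc, ih]; rfl

-- pyRange 0 n 2 as a mapped List.range
theorem pvRange_two (n : Nat) :
    PySem.List.pyRange 0 (n : Int) 2 =
      (List.range ((n + 1) / 2)).map (fun k => ((2 * k : Nat) : Int)) := by
  unfold PySem.List.pyRange
  rw [if_neg (by norm_num : ¬ ((2 : Int) = 0))]
  rw [if_pos (by norm_num : (0 : Int) < 2)]
  have hc : (if (0 : Int) < (n : Int) then (((n : Int) - 0 + 2 - 1) / 2).toNat else 0)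
      = (n + 1) / 2 := by
    by_cases h : (0 : Int) < (n : Int)
    · rw [if_pos h]; omega
    · rw [if_neg h]; omega
  rw [hc]
  apply List.map_congr_left
  intro k _
  push_cast
  ring

theorem pvSlice_elem (cs : List Char) (k : Nat) :
    PySem.List.slice cs (some ((2 * k : Nat) : Int)) (some (((2 * k : Nat) : Int) + 2))
      = (cs.drop (2 * k)).take 2 := by
  have h : ((2 * k : Nat) : Int) + 2 = ((2 * k + 2 : Nat) : Int) := by push_cast; ring
  rw [h, PySem.List.slice_natCast]
  congr 1
  omega

theorem pvTake2_chunk (m : List Char) :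
    (List.range ((m.length + 1) / 2)).map (fun k => (m.drop (2 * k)).take 2) = pvChunk m := by
  induction m using pvChunk.induct with
  | case1 => simp [pvChunk]
  | case2 a => simp [pvChunk]
  | case3 a b t ih =>
    have hl : ((a :: b :: t).length + 1) / 2 = (t.length + 1) / 2 + 1 := by
      simp only [List.length_cons]; omega
    rw [hl, List.range_succ_eq_map, List.map_cons, List.map_map]
    simp only [pvChunk]
    -- congr: head 'take 2 (drop 0 (a::b::t)) = [a,b]' is rfl; tail is closed from ih
    congr 1

theorem pvB_eq_chunk (cs : List Char) :
    ((PySem.List.pyRange 0 (cs.length : Int) 2).map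
      (fun i => PySem.List.slice cs (some i) (some (i + 2)))) = pvChunk cs := by
  rw [pvRange_two, List.map_map, ← pvTake2_chunk cs]
  apply List.map_congr_left
  intro k _
  simp only [Function.comp_apply]
  exact pvSlice_elem cs k

theorem pvWord_eq (w : String) : pvAWord w = pvBWord w := by
  unfold pvAWord pvBWord
  rw [pvB_eq_chunk]
  rw [← pvA_eq_chunk w.toList]

theorem pvFoldl_append_map (f : String → String) (ws : List String) (init : List String) :
    ws.foldl (fun g w => g ++ [f w]) init = init ++ ws.map f := by
  induction ws generalizing init with
  | nil => simp
  | cons w ws ih => simp [ih]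

-- ===== VERDICT (by name: the statement is the Claim_ definition above) =====
theorem break_into_syllables_spec : Claim_equal_break_into_syllables := by
  intro text _
  show break_into_syllables text = break_into_syllables_alt text
  show PySem.Str.join " | " ((PySem.Str.split₀ text).foldl (fun g w => g ++ [pvAWord w]) [])
      = PySem.Str.join " | " ((PySem.Str.split₀ text).map pvBWord)
  rw [pvFoldl_append_map pvAWord, List.nil_append]
  congr 1
  exact List.map_congr_left (fun w _ => pvWord_eq w)
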